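-- pv_equiv track=rewrite | github.com/jesusaguado/pathfinding-challenge | functions.py | rod_collision
-- ===== SOURCE A (Python) =====
-- RADIUS = 1 # how long the arm of the rod extends from the center.
--
-- def point_in_box(x,y,lx,ly):
--     """ Check in point lies within the box of size lx x ly """
--     return all([ 0 <= y, y < ly , 0 <= x, x < lx ])
--
-- def sits_in_box(rod, len_x, len_y):
--     """
--     This function checks that the rod sits within the given box.
--     Inputs:
--         - rod: a tuple containing x,y position of center and orientation
--         - len_x, len_y: the dimensions of the labyrinth
--     Output:
--         - boolean attesting to whether the rod sits entirely within the frame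
--     """
--     x = rod[0]
--     y = rod[1]
--     o = rod[2]
--     if bool(o): # rod is vertical
--         return all([ RADIUS <= y, y < len_y - RADIUS, 0 <= x, x < len_x ])
--     else: # rod is horizontal
--         return all([ 0 <= y, y < len_y, RADIUS <= x, x < len_x - RADIUS])
--
-- def get_xs_ys(rod):
--     """
--     Gives xs and ys list of all positions.
--     Input:
--         - rod: a tuple containing x,y position of center and orientation
--
--     Output:
--         - xs, ys: two lists of the same length, non-decreasing lists of the x and y
--             positions of all nodes of the rod
--     """
--     x,y,o = rod
--
--     l = (2*RADIUS + 1) # the total length of the rod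
--
--     # generate all the points to check
--     if o: # if rod  is vertical
--         ys = [y - RADIUS, y, y + RADIUS]
--         xs = l*[x]
--     else: # if rod is horizontal
--         xs = [x - RADIUS, x, x + RADIUS]
--         ys = l*[y]
--     return xs,ys
--
-- def get_shape(lab):
--     """
--     This function gets the size of the labyrinth and validates that it has
--     viable rows.
--     """
--
--     len_y = len(lab)
--
--     if len_y == 0:
--         raise ValueError("Invalid labyrinth!")
--
--     len_x = len(lab[0])
--
--     for k in range(len_y):
--         if len(lab[k]) != len_x:
--             raise ValueError("Invalid labyrinth!")
--     return len_x, len_y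
--
-- def point_collision(x,y,lab):
--     """
--     This function checks whether a point is a solid block of the labyrinth.
--     """
--     lx,ly = get_shape(lab)
--     if not point_in_box(x,y,lx,ly):
--         return False # otherwise we cannot test if the point is a block
--     return (lab[y][x] == '#')
--
-- def rod_collision(rod, lab):
--     """
--     This function checks whether the given rod sits within
--     the labyrinth without colliding with the walls.
--     Inputs:
--         - rod: a tuple containing x,y position of center and orientation
--         - lab: the list of lists encoding the labyrinth
--     Outpus:
--         - a boolean, True if there is a collision or exits the box, False otherwise.
--     """
--     len_x, len_y = get_shape(lab)
--     if not sits_in_box(rod, len_x, len_y):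
--         return True
--
--     xs, ys = get_xs_ys(rod)
--     l = len(xs) # total length of the rod
--
--     for k in range(l):
--         if point_collision(xs[k],ys[k],lab):
--             return True
--     return False
-- ===== SOURCE B (Python) =====
-- def rod_collision(rod, lab):
--     """Reverse scan: validate the grid, compute the rod's bounding box by
--     arithmetic, then sweep every cell of the labyrinth and report a collision
--     if any wall cell lies inside the box; non-fitting rods are caught by the
--     single interval bounds test."""
--     len_y = len(lab)
--     if len_y == 0:
--         raise ValueError("Invalid labyrinth!")
--     len_x = len(lab[0])
--     for row in lab:
--         if len(row) != len_x:
--             raise ValueError("Invalid labyrinth!")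
--     x, y, o = rod
--     dx, dy = (0, 1) if o else (1, 0)
--     if x - dx < 0 or x + dx >= len_x or y - dy < 0 or y + dy >= len_y:
--         return True
--     for j, row in enumerate(lab):
--         if y - dy <= j <= y + dy:
--             for i, c in enumerate(row):
--                 if c == '#' and x - dx <= i <= x + dx:
--                     return True
--     return False
-- ===== Notes on version B (the rewrite author's own statement) =====
-- stated objective: alternative
-- what changed: A tests the three rod cells against the grid (global sits_in_box guard, then per-cell point_collision lookups, each re-validating the labyrinth); B inverts the direction of the test: it derives the rod's bounding box by arithmetic, checks the fit with one interval comparison, and then sweeps the whole labyrinth, reporting a collision when a wall cell '#' falls inside the box; trades three O(1) lookups for a grid sweep with no per-cell re-validation.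
-- outside the precondition, e.g. on rod_collision((1, 1, 0), []): A raises ValueError, B raises ValueError; on rod_collision((1, 1, 0), ['..', '...']): A raises ValueError, B raises ValueError
import Mathlib
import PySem

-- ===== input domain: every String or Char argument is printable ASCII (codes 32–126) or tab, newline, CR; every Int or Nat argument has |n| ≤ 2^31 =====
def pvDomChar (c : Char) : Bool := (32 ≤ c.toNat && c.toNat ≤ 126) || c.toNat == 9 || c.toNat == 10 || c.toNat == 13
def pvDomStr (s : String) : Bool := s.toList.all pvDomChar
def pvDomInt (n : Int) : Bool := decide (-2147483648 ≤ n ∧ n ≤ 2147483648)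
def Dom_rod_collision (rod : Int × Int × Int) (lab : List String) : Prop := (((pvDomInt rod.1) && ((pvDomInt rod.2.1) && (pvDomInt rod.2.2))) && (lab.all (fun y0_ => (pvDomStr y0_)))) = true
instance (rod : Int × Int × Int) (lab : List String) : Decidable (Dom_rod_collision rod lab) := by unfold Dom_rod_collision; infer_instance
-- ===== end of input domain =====

-- B inverts the direction of A's test: it checks the rod's fit with one arithmetic
-- interval comparison and then sweeps the whole labyrinth for a wall cell inside the
-- rod's bounding box (grid → rod membership instead of rod → grid lookup); objective:
-- alternative. Outside Pre_ (invalid labyrinth) both Pythons raise ValueError.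

-- ===== PORT A =====
-- get_shape: returns none exactly where Python raises ValueError
def pvGetShapeA (lab : List String) : Option (Int × Int) :=
  let len_y : Int := (lab.length : Int)
  if len_y = 0 then none
  else
    let len_x := PySem.Str.len (PySem.List.pyGetD lab 0 "")
    -- 'for k in range(len_y): if len(lab[k]) != len_x: raise' as a scan over the rows
    if lab.all (fun row => PySem.Str.len row == len_x) then some (len_x, len_y) else none

def pvPointInBox (x y lx ly : Int) : Bool :=
  decide (0 ≤ y) && decide (y < ly) && decide (0 ≤ x) && decide (x < lx)

def pvSitsInBox (rod : Int × Int × Int) (len_x len_y : Int) : Bool :=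
  let x := rod.1
  let y := rod.2.1
  let o := rod.2.2
  if o ≠ 0 then -- rod is vertical (RADIUS = 1)
    decide (1 ≤ y) && decide (y < len_y - 1) && decide (0 ≤ x) && decide (x < len_x)
  else -- rod is horizontal
    decide (0 ≤ y) && decide (y < len_y) && decide (1 ≤ x) && decide (x < len_x - 1)

def pvGetXsYs (rod : Int × Int × Int) : List Int × List Int :=
  let x := rod.1
  let y := rod.2.1
  let o := rod.2.2
  if o ≠ 0 then ([x, x, x], [y - 1, y, y + 1])
  else ([x - 1, x, x + 1], [y, y, y])

def pvPointCollision (x y : Int) (lab : List String) : Bool :=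
  match pvGetShapeA lab with
  | none => false -- unreachable under Pre_ (Python raises)
  | some (lx, ly) =>
    if ¬ pvPointInBox x y lx ly then false
    else PySem.Str.pyGet? (PySem.List.pyGetD lab y "") x == some '#'

-- 'for k in range(l): if point_collision(...): return True' / 'return False'
def pvRodLoopA (xs ys : List Int) (lab : List String) : List Int → Bool
  | [] => false
  | k :: rest =>
    if pvPointCollision (PySem.List.pyGetD xs k 0) (PySem.List.pyGetD ys k 0) lab then true
    else pvRodLoopA xs ys lab rest

def rod_collision (rod : Int × Int × Int) (lab : List String) : Bool :=
  match pvGetShapeA lab with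
  | none => false -- Python raises ValueError here; excluded by Pre_
  | some (len_x, len_y) =>
    if ¬ pvSitsInBox rod len_x len_y then true
    else
      let xy := pvGetXsYs rod
      pvRodLoopA xy.1 xy.2 lab (PySem.List.pyRange 0 (xy.1.length : Int) 1)

-- ===== PORT B =====
def rod_collision_alt (rod : Int × Int × Int) (lab : List String) : Bool :=
  if lab.length = 0 then false -- Python raises ValueError here; excluded by Pre_
  else
    let len_x := PySem.Str.len (PySem.List.pyGetD lab 0 "")
    if lab.any (fun row => PySem.Str.len row != len_x) then false -- Python raises; excluded by Pre_
    else
      let len_y : Int := (lab.length : Int)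
      let x := rod.1
      let y := rod.2.1
      let o := rod.2.2
      let d := if o ≠ 0 then ((0 : Int), (1 : Int)) else ((1 : Int), (0 : Int))
      let dx := d.1
      let dy := d.2
      if x - dx < 0 ∨ x + dx ≥ len_x ∨ y - dy < 0 ∨ y + dy ≥ len_y then true
      else
        (PySem.List.enumerate lab 0).any (fun jr =>
          decide (y - dy ≤ jr.1) && decide (jr.1 ≤ y + dy) &&
          (PySem.List.enumerate jr.2.toList 0).any (fun ic =>
            ic.2 == '#' && decide (x - dx ≤ ic.1) && decide (ic.1 ≤ x + dx)))

-- ===== PRECONDITION & SPEC =====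
-- Pre_ excludes exactly the labyrinths on which A (and B) raises ValueError:
-- an empty list or rows of unequal length.
def Pre_rod_collision (rod : Int × Int × Int) (lab : List String) : Prop :=
  lab ≠ [] ∧ ∀ s ∈ lab, PySem.Str.len s = PySem.Str.len (PySem.List.pyGetD lab 0 "")
instance (rod : Int × Int × Int) (lab : List String) : Decidable (Pre_rod_collision rod lab) := by
  unfold Pre_rod_collision; infer_instance

def pvWitness_rod_collision : (Int × Int × Int) × List String := ((1, 0, 0), ["...", "#.#"])

def Spec_rod_collision (rod : Int × Int × Int) (lab : List String) (out : Bool) : Prop := out = rod_collision_alt rod lab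
instance (rod : Int × Int × Int) (lab : List String) (out : Bool) : Decidable (Spec_rod_collision rod lab out) := by unfold Spec_rod_collision; infer_instance

-- ===== CLAIM (what is proved, stated in full; the proofs are below) =====
def Claim_equal_rod_collision : Prop := ∀ (rod : Int × Int × Int) (lab : List String), Dom_rod_collision rod lab → Pre_rod_collision rod lab → Spec_rod_collision rod lab (rod_collision rod lab)

-- ===== LEMMAS AND PROOFS =====

-- 'cell (cx,cy) of lab is a wall', as both programs read it
def pvWall (lab : List String) (cx cy : Int) : Bool :=
  PySem.Str.pyGet? (PySem.List.pyGetD lab cy "") cx == some '#'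

theorem gridscan_iff (lab : List String) (lx : Int)
    (hrows : ∀ s ∈ lab, PySem.Str.len s = lx)
    (xlo xhi ylo yhi : Int) :
    ((PySem.List.enumerate lab 0).any (fun jr =>
        decide (ylo ≤ jr.1) && decide (jr.1 ≤ yhi) &&
        (PySem.List.enumerate jr.2.toList 0).any (fun ic =>
          ic.2 == '#' && decide (xlo ≤ ic.1) && decide (ic.1 ≤ xhi))) = true)
    ↔ ∃ cx cy : Int, xlo ≤ cx ∧ cx ≤ xhi ∧ ylo ≤ cy ∧ cy ≤ yhi ∧
        0 ≤ cy ∧ cy < (lab.length : Int) ∧ 0 ≤ cx ∧ cx < lx ∧ pvWall lab cx cy = true := by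
  simp only [List.any_eq_true, Bool.and_eq_true, decide_eq_true_eq, beq_iff_eq]
  constructor
  · rintro ⟨jr, hjr, ⟨hy1, hy2⟩, ic, hic, ⟨hc, hx1⟩, hx2⟩
    rw [PySem.List.mem_enumerate_iff] at hjr
    obtain ⟨j, hj, rfl⟩ := hjr
    rw [PySem.List.mem_enumerate_iff] at hic
    obtain ⟨i, hi, rfl⟩ := hic
    simp only [zero_add] at *
    simp only at hi hc
    refine ⟨(i:Int), (j:Int), hx1, hx2, hy1, hy2, Int.natCast_nonneg j,
      by exact_mod_cast hj, Int.natCast_nonneg i, ?_, ?_⟩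
    · rw [← hrows lab[j] (lab.getElem_mem hj), PySem.Str.len_eq]
      exact_mod_cast hi
    · simp [pvWall, PySem.List.pyGetD_eq_getElem lab "" (Int.natCast_nonneg j) (by exact_mod_cast hj),
        pysem, List.getElem?_eq_getElem hi, hc]
  · rintro ⟨cx, cy, hx1, hx2, hy1, hy2, hcy0, hcy1, hcx0, hcx1, hw⟩
    have hj : cy.toNat < lab.length := by omega
    have hgd : PySem.List.pyGetD lab cy "" = lab[cy.toNat] :=
      PySem.List.pyGetD_eq_getElem lab "" hcy0 hcy1
    have hlen : cx.toNat < lab[cy.toNat].toList.length := by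
      have := hrows lab[cy.toNat] (lab.getElem_mem hj)
      rw [PySem.Str.len_eq] at this
      omega
    have hch : lab[cy.toNat].toList[cx.toNat] = '#' := by
      simp only [pvWall, hgd] at hw
      rw [show cx = ((cx.toNat : Nat) : Int) by omega, PySem.Str.pyGet?_natCast,
        List.getElem?_eq_getElem hlen] at hw
      simpa using hw
    refine ⟨((cy:Int), lab[cy.toNat]), ?_, ⟨?_, ?_⟩, ((cx:Int), '#'), ?_, ⟨?_, ?_⟩, ?_⟩
    · rw [PySem.List.mem_enumerate_iff]
      exact ⟨cy.toNat, hj, by simp; omega⟩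
    · exact hy1
    · exact hy2
    · rw [PySem.List.mem_enumerate_iff]
      exact ⟨cx.toNat, hlen, by simp [hch]; omega⟩
    · rfl
    · exact hx1
    · exact hx2

theorem shapeA_eq (lab : List String) (h : Pre_rod_collision (0,0,0) lab) :
    pvGetShapeA lab = some (PySem.Str.len (PySem.List.pyGetD lab 0 ""), (lab.length : Int)) := by
  obtain ⟨hne, hrows⟩ := h
  simp [pvGetShapeA, hne, List.all_eq_true]
  intro s hs
  simpa using hrows s hs

-- A's loop over the three rod cells, unfolded to a disjunction of wall tests
theorem rodLoopA_eq (x1 y1 x2 y2 x3 y3 lx : Int) (lab : List String)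
    (hA : pvGetShapeA lab = some (lx, (lab.length : Int)))
    (h1 : pvPointInBox x1 y1 lx (lab.length : Int) = true)
    (h2 : pvPointInBox x2 y2 lx (lab.length : Int) = true)
    (h3 : pvPointInBox x3 y3 lx (lab.length : Int) = true) :
    pvRodLoopA [x1, x2, x3] [y1, y2, y3] lab
        (PySem.List.pyRange 0 ((([x1, x2, x3] : List Int).length : Int)) 1)
      = (pvWall lab x1 y1 || pvWall lab x2 y2 || pvWall lab x3 y3) := by
  have hr : PySem.List.pyRange 0 ((([x1, x2, x3] : List Int).length : Int)) 1 = [0, 1, 2] := by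
    norm_num [PySem.List.pyRange]; decide
  rw [hr]
  simp only [pvRodLoopA, pvPointCollision, hA, pvWall,
    show PySem.List.pyGetD [x1, x2, x3] 0 0 = x1 by simp [pysem],
    show PySem.List.pyGetD [x1, x2, x3] 1 0 = x2 by simp [PySem.List.pyGetD, PySem.List.pyGet?, PySem.List.pyIdx?],
    show PySem.List.pyGetD [x1, x2, x3] 2 0 = x3 by simp [PySem.List.pyGetD, PySem.List.pyGet?, PySem.List.pyIdx?],
    show PySem.List.pyGetD [y1, y2, y3] 0 0 = y1 by simp [pysem],
    show PySem.List.pyGetD [y1, y2, y3] 1 0 = y2 by simp [PySem.List.pyGetD, PySem.List.pyGet?, PySem.List.pyIdx?],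
    show PySem.List.pyGetD [y1, y2, y3] 2 0 = y3 by simp [PySem.List.pyGetD, PySem.List.pyGet?, PySem.List.pyIdx?],
    h1, h2, h3, not_true_eq_false, if_false]
  set c1 := (PySem.Str.pyGet? (PySem.List.pyGetD lab y1 "") x1 == some '#')
  set c2 := (PySem.Str.pyGet? (PySem.List.pyGetD lab y2 "") x2 == some '#')
  set c3 := (PySem.Str.pyGet? (PySem.List.pyGetD lab y3 "") x3 == some '#')
  cases c1 <;> cases c2 <;> cases c3 <;> rfl

-- ===== VERDICT (by name: the statement is the Claim_ definition above) =====
theorem rod_collision_spec : Claim_equal_rod_collision := by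
  intro rod lab _hdom hpre
  unfold Spec_rod_collision
  obtain ⟨x, y, o⟩ := rod
  obtain ⟨hne, hrows0⟩ := hpre
  have hA := shapeA_eq lab ⟨hne, hrows0⟩
  have hlen0 : ¬ lab.length = 0 := by simpa [List.length_eq_zero_iff] using hne
  have hanyrow : lab.any (fun row => PySem.Str.len row != PySem.Str.len (PySem.List.pyGetD lab 0 "")) = false := by
    simp only [List.any_eq_false]
    intro s hs
    rw [Bool.not_eq_true, bne_eq_false_iff_eq]
    exact hrows0 s hs
  unfold rod_collision rod_collision_alt
  rw [hA]
  simp only [if_neg hlen0, hanyrow, Bool.false_eq_true, if_false]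
  set lx := PySem.Str.len (PySem.List.pyGetD lab 0 "") with hlx
  set ly : Int := (lab.length : Int) with hly
  by_cases ho : o = 0
  · -- horizontal rod: box is [x-1, x+1] × [y, y]
    simp only [ho, ne_eq, not_true_eq_false, if_false, sub_zero, add_zero]
    rcases Decidable.em (x - 1 < 0 ∨ x + 1 ≥ lx ∨ y < 0 ∨ y ≥ ly) with hbox | hbox
    · rw [if_pos hbox]
      have hsits : pvSitsInBox (x, y, 0) lx ly = false := by
        simp only [pvSitsInBox]
        simp only [show ((x, y, (0:Int)).2.2 ≠ 0) = False by simp, if_false]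
        simp only [Bool.and_eq_false_iff, decide_eq_false_iff_not]
        omega
      rw [if_pos (by simp [hsits])]
    · rw [if_neg hbox]
      push Not at hbox
      have hsits : pvSitsInBox (x, y, 0) lx ly = true := by
        simp only [pvSitsInBox]
        simp only [show ((x, y, (0:Int)).2.2 ≠ 0) = False by simp, if_false]
        simp only [Bool.and_eq_true, decide_eq_true_eq]
        omega
      rw [if_neg (by simp [hsits])]
      have hxy : pvGetXsYs (x, y, (0:Int)) = ([x - 1, x, x + 1], [y, y, y]) := by
        simp [pvGetXsYs]
      rw [hxy]
      rw [rodLoopA_eq (x - 1) y x y (x + 1) y lx lab hA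
          (by simp only [pvPointInBox, Bool.and_eq_true, decide_eq_true_eq]; omega)
          (by simp only [pvPointInBox, Bool.and_eq_true, decide_eq_true_eq]; omega)
          (by simp only [pvPointInBox, Bool.and_eq_true, decide_eq_true_eq]; omega)]
      rw [Bool.eq_iff_iff, gridscan_iff lab lx hrows0 (x - 1) (x + 1) y y]
      constructor
      · intro h
        simp only [Bool.or_eq_true] at h
        rcases h with (h | h) | h
        · exact ⟨x - 1, y, by omega, by omega, by omega, by omega, by omega, by omega, by omega, by omega, h⟩
        · exact ⟨x, y, by omega, by omega, by omega, by omega, by omega, by omega, by omega, by omega, h⟩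
        · exact ⟨x + 1, y, by omega, by omega, by omega, by omega, by omega, by omega, by omega, by omega, h⟩
      · rintro ⟨cx, cy, hc1, hc2, hc3, hc4, _, _, _, _, hw⟩
        have hcy : cy = y := by omega
        have hcx : cx = x - 1 ∨ cx = x ∨ cx = x + 1 := by omega
        subst hcy
        rcases hcx with rfl | rfl | rfl <;> simp [hw]
  · -- vertical rod: box is [x, x] × [y-1, y+1]
    simp only [ho, ne_eq, not_false_eq_true, if_true, sub_zero, add_zero]
    rcases Decidable.em (x < 0 ∨ x ≥ lx ∨ y - 1 < 0 ∨ y + 1 ≥ ly) with hbox | hbox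
    · rw [if_pos hbox]
      have hsits : pvSitsInBox (x, y, o) lx ly = false := by
        simp only [pvSitsInBox]
        simp only [show ((x, y, o).2.2 ≠ 0) = True by simpa using ho, if_true]
        simp only [Bool.and_eq_false_iff, decide_eq_false_iff_not]
        omega
      rw [if_pos (by simp [hsits])]
    · rw [if_neg hbox]
      push Not at hbox
      have hsits : pvSitsInBox (x, y, o) lx ly = true := by
        simp only [pvSitsInBox]
        simp only [show ((x, y, o).2.2 ≠ 0) = True by simpa using ho, if_true]
        simp only [Bool.and_eq_true, decide_eq_true_eq]
        omega
      rw [if_neg (by simp [hsits])]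
      have hxy : pvGetXsYs (x, y, o) = ([x, x, x], [y - 1, y, y + 1]) := by
        simp [pvGetXsYs, ho]
      rw [hxy]
      rw [rodLoopA_eq x (y - 1) x y x (y + 1) lx lab hA
          (by simp only [pvPointInBox, Bool.and_eq_true, decide_eq_true_eq]; omega)
          (by simp only [pvPointInBox, Bool.and_eq_true, decide_eq_true_eq]; omega)
          (by simp only [pvPointInBox, Bool.and_eq_true, decide_eq_true_eq]; omega)]
      rw [Bool.eq_iff_iff, gridscan_iff lab lx hrows0 x x (y - 1) (y + 1)]
      constructor
      · intro h
        simp only [Bool.or_eq_true] at h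
        rcases h with (h | h) | h
        · exact ⟨x, y - 1, by omega, by omega, by omega, by omega, by omega, by omega, by omega, by omega, h⟩
        · exact ⟨x, y, by omega, by omega, by omega, by omega, by omega, by omega, by omega, by omega, h⟩
        · exact ⟨x, y + 1, by omega, by omega, by omega, by omega, by omega, by omega, by omega, by omega, h⟩
      · rintro ⟨cx, cy, hc1, hc2, hc3, hc4, _, _, _, _, hw⟩
        have hcx : cx = x := by omega
        have hcy : cy = y - 1 ∨ cy = y ∨ cy = y + 1 := by omega
        subst hcx
        rcases hcy with rfl | rfl | rfl <;> simp [hw]
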